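-- pv_equiv track=rewrite | github.com/Pimavlik/telegram_bot | PythonApplication3.py | check_ip_mask
-- ===== SOURCE A (Python) =====
-- from collections import Counter
--
-- def check_ip_mask(message):
--     check = True
--     count = Counter(message)
--     signes = ["."]
--     numbers = ["1", "2", "3", "4", "5", "6", "7", "8", "9", "0"]
--     if count['.'] != 3:
--         check = False
--     for i in range(len(message)):
--         if message[i] not in signes + numbers:
--             check = False
--     return check
-- ===== SOURCE B (Python) =====
-- def check_ip_mask(message):
--     parts = message.split(".")
--     return len(parts) == 4 and all(p == "" or p.isdigit() for p in parts)
-- ===== Notes on version B (the rewrite author's own statement) =====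
-- stated objective: faster
-- what changed: Replaced the Counter-based dot count plus a per-index scan doing list membership for every character with a single split on the dot separator, checking for exactly 4 segments that are each empty or all digits.
import Mathlib
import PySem

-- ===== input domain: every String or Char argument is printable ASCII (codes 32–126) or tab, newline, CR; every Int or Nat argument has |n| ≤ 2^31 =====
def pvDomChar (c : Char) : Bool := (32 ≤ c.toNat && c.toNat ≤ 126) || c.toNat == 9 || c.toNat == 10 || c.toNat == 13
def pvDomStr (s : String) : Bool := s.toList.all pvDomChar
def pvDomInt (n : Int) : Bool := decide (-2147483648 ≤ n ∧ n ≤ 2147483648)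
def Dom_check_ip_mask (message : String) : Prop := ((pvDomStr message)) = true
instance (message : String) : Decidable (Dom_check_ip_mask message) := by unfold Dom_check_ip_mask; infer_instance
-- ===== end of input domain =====

-- B replaces A's Counter dot-count plus per-index membership scan with one split on '.'
-- checking for exactly 4 segments, each empty or all digits (objective: simpler).

-- ===== PORT A =====
def check_ip_mask (message : String) : Bool :=
  let l := message.toList
  let check := true
  let count := PySem.Dict.counter l
  let signes : List Char := ['.']
  let numbers : List Char := ['1', '2', '3', '4', '5', '6', '7', '8', '9', '0']
  let check := if count.getD '.' 0 ≠ 3 then false else check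
  (PySem.List.pyRange 0 (PySem.List.len l)).foldl
    (fun chk i => if PySem.List.pyGetD l i ' ' ∉ signes ++ numbers then false else chk)
    check

-- ===== PORT B =====
def check_ip_mask_alt (message : String) : Bool :=
  let parts := PySem.Chars.splitOn message.toList ['.']   -- message.split("."), sep ≠ ""
  parts.length == 4 && parts.all (fun p => p == [] || PySem.Chars.strIsdigit p)

-- ===== PRECONDITION & SPEC =====
def Spec_check_ip_mask (message : String) (out : Bool) : Prop := out = check_ip_mask_alt message
instance (message : String) (out : Bool) : Decidable (Spec_check_ip_mask message out) := by unfold Spec_check_ip_mask; infer_instance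

-- ===== CLAIM (what is proved, stated in full; the proofs are below) =====
def Claim_equal_check_ip_mask : Prop := ∀ (message : String), Dom_check_ip_mask message → Spec_check_ip_mask message (check_ip_mask message)

-- ===== LEMMAS AND PROOFS =====

-- reference model of message.split(".") used only by the proofs
def dotSplit : List Char → List (List Char)
  | [] => [[]]
  | c :: t => if c = '.' then [] :: dotSplit t else (dotSplit t).modifyHead (c :: ·)

lemma dotSplit_ne_nil (l : List Char) : dotSplit l ≠ [] := by
  cases l with
  | nil => simp [dotSplit]
  | cons c t =>
    simp only [dotSplit]
    split_ifs
    · simp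
    · cases h : dotSplit t with
      | nil => exact absurd h (dotSplit_ne_nil t)
      | cons a b => simp

lemma splitOn_go_dot (fuel : ℕ) (l cur : List Char) (acc : List (List Char))
    (h : l.length ≤ fuel) :
    PySem.Chars.splitOn.go ['.'] fuel l cur acc
      = acc.reverse ++ (dotSplit l).modifyHead (cur.reverse ++ ·) := by
  induction fuel generalizing l cur acc with
  | zero =>
    have hnil : l = [] := List.length_eq_zero_iff.mp (Nat.le_zero.mp h)
    subst hnil
    simp [PySem.Chars.splitOn.go, dotSplit]
  | succ fuel ih =>
    cases l with
    | nil => simp [PySem.Chars.splitOn.go, dotSplit]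
    | cons c rest =>
      have hrest : rest.length ≤ fuel := by
        have h' := h; simp only [List.length_cons] at h'; omega
      by_cases hc : c = '.'
      · subst hc
        have hpf : List.isPrefixOf ['.'] ('.' :: rest) = true := by
          simp [List.isPrefixOf]
        rw [PySem.Chars.splitOn.go, hpf]
        simp only [if_true, List.length_cons, List.length_nil, List.drop_succ_cons,
          List.drop_zero]
        rw [ih rest [] (cur.reverse :: acc) hrest]
        cases hds : dotSplit rest with
        | nil => exact absurd hds (dotSplit_ne_nil rest)
        | cons a b => simp [dotSplit, hds, List.modifyHead]
      · have hpf : List.isPrefixOf ['.'] (c :: rest) = false := by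
          simp [List.isPrefixOf, Ne.symm hc]
        rw [PySem.Chars.splitOn.go, hpf]
        simp only [Bool.false_eq_true, if_false]
        rw [ih rest (c :: cur) acc hrest]
        cases hds : dotSplit rest with
        | nil => exact absurd hds (dotSplit_ne_nil rest)
        | cons a b => simp [dotSplit, hc, hds, List.modifyHead]

lemma splitOn_eq_dotSplit (l : List Char) :
    PySem.Chars.splitOn l ['.'] = dotSplit l := by
  have h := splitOn_go_dot (l.length + 1) l [] [] (Nat.le_succ _)
  cases hds : dotSplit l with
  | nil => exact absurd hds (dotSplit_ne_nil l)
  | cons a b =>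
    simpa [PySem.Chars.splitOn, hds, List.modifyHead] using h

lemma dotSplit_length (l : List Char) :
    (dotSplit l).length = l.count '.' + 1 := by
  induction l with
  | nil => simp [dotSplit]
  | cons c t ih =>
    by_cases hc : c = '.'
    · subst hc; simp [dotSplit, ih]
    · simp [dotSplit, hc, ih]

lemma good_eq_all_isdigit (p : List Char) :
    ((p == []) || PySem.Chars.strIsdigit p) = p.all PySem.Chars.isdigit := by
  cases p <;> simp [PySem.Chars.strIsdigit]

lemma dotSplit_all_digits (l : List Char) :
    (dotSplit l).all (fun p => p.all PySem.Chars.isdigit)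
      = l.all (fun c => c == '.' || PySem.Chars.isdigit c) := by
  induction l with
  | nil => simp [dotSplit]
  | cons c t ih =>
    by_cases hc : c = '.'
    · subst hc; simp [dotSplit, ih]
    · cases hds : dotSplit t with
      | nil => exact absurd hds (dotSplit_ne_nil t)
      | cons a b =>
        have e1 : dotSplit (c :: t) = (c :: a) :: b := by
          simp [dotSplit, hc, hds, List.modifyHead]
        have hcb : (c == '.') = false := by simp [hc]
        rw [hds] at ih
        rw [e1]
        simp only [List.all_cons, hcb, Bool.false_or]
        rw [← ih]
        simp [List.all_cons, Bool.and_assoc]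

lemma foldl_guard_gen {α : Type} (q : α → Prop) [DecidablePred q] (xs : List α) (b : Bool) :
    xs.foldl (fun chk x => if ¬ q x then false else chk) b
      = (b && xs.all (fun x => decide (q x))) := by
  induction xs generalizing b with
  | nil => simp
  | cons x t ih =>
    simp only [List.foldl_cons]
    by_cases hx : q x
    · rw [if_neg (not_not_intro hx), ih]
      simp [hx]
    · rw [if_pos hx, ih]
      simp [hx]

lemma char_eq_of_toNat_eq {c d : Char} (h : c.toNat = d.toNat) : c = d := by
  apply Char.ext
  rw [← Char.ofNat_toNat_eq_val, ← Char.ofNat_toNat_eq_val, h]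

lemma char_cond (c : Char) :
    (decide (c ∈ ['.'] ++ ['1', '2', '3', '4', '5', '6', '7', '8', '9', '0']))
      = ((c == '.') || PySem.Chars.isdigit c) := by
  by_cases hc : c = '.'
  · subst hc; decide
  · have hcb : (c == '.') = false := by simp [hc]
    rw [hcb, Bool.false_or]
    simp only [PySem.Chars.isdigit]
    rcases h9 : (decide ('0' ≤ c) && decide (c ≤ '9')) with _ | _
    · -- c is not a digit: show membership fails
      simp only [decide_eq_false_iff_not]
      intro hm
      simp only [List.cons_append, List.nil_append, List.mem_cons, hc, false_or,
        List.not_mem_nil, or_false] at hm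
      rcases hm with rfl | rfl | rfl | rfl | rfl | rfl | rfl | rfl | rfl | rfl <;>
        simp at h9
    · -- c is a digit: show membership holds
      simp only [Bool.and_eq_true, decide_eq_true_eq] at h9
      obtain ⟨h1, h2⟩ := h9
      have hlo : 48 ≤ c.toNat := h1
      have hhi : c.toNat ≤ 57 := h2
      have hcases : c.toNat = 48 ∨ c.toNat = 49 ∨ c.toNat = 50 ∨ c.toNat = 51 ∨
          c.toNat = 52 ∨ c.toNat = 53 ∨ c.toNat = 54 ∨ c.toNat = 55 ∨
          c.toNat = 56 ∨ c.toNat = 57 := by omega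
      simp only [decide_eq_true_eq]
      rcases hcases with hx | hx | hx | hx | hx | hx | hx | hx | hx | hx <;>
        [ (have e : c = '0' := char_eq_of_toNat_eq (by rw [hx]; decide));
          (have e : c = '1' := char_eq_of_toNat_eq (by rw [hx]; decide));
          (have e : c = '2' := char_eq_of_toNat_eq (by rw [hx]; decide));
          (have e : c = '3' := char_eq_of_toNat_eq (by rw [hx]; decide));
          (have e : c = '4' := char_eq_of_toNat_eq (by rw [hx]; decide));
          (have e : c = '5' := char_eq_of_toNat_eq (by rw [hx]; decide));
          (have e : c = '6' := char_eq_of_toNat_eq (by rw [hx]; decide));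
          (have e : c = '7' := char_eq_of_toNat_eq (by rw [hx]; decide));
          (have e : c = '8' := char_eq_of_toNat_eq (by rw [hx]; decide));
          (have e : c = '9' := char_eq_of_toNat_eq (by rw [hx]; decide)) ] <;>
        simp [e]

-- ===== VERDICT (by name: the statement is the Claim_ definition above) =====
theorem check_ip_mask_spec : Claim_equal_check_ip_mask := by
  intro message _
  unfold Spec_check_ip_mask check_ip_mask check_ip_mask_alt
  set l := message.toList with hl
  rw [splitOn_eq_dotSplit]
  simp only [PySem.Dict.getD_counter]
  rw [foldl_guard_gen
    (fun i => PySem.List.pyGetD l i ' ' ∈ ['.'] ++ ['1', '2', '3', '4', '5', '6', '7', '8', '9', '0'])]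
  have hmap : (PySem.List.pyRange 0 (PySem.List.len l)).all
      (fun i => decide (PySem.List.pyGetD l i ' ' ∈ ['.'] ++ ['1', '2', '3', '4', '5', '6', '7', '8', '9', '0']))
      = l.all (fun c => decide (c ∈ ['.'] ++ ['1', '2', '3', '4', '5', '6', '7', '8', '9', '0'])) := by
    conv_rhs => rw [← PySem.List.map_pyGetD_pyRange_zero l ' ']
    rw [List.all_map]
    rfl
  rw [hmap]
  have hall : l.all (fun c => decide (c ∈ ['.'] ++ ['1', '2', '3', '4', '5', '6', '7', '8', '9', '0']))
      = l.all (fun c => c == '.' || PySem.Chars.isdigit c) :=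
    congrArg (List.all l) (funext char_cond)
  rw [hall]
  have hgood : (dotSplit l).all (fun p => p == [] || PySem.Chars.strIsdigit p)
      = (dotSplit l).all (fun p => p.all PySem.Chars.isdigit) :=
    congrArg (List.all (dotSplit l)) (funext good_eq_all_isdigit)
  rw [hgood, dotSplit_all_digits, dotSplit_length]
  by_cases h3 : l.count '.' = 3
  · simp [h3]
  · have hne : ((l.count '.' : Int)) ≠ 3 := by exact_mod_cast h3
    simp [hne, h3]
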